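-- pv_equiv track=rewrite | github.com/johnsonice/IMF_VE_News | news_scrape/libs/search_util.py | separate_overlapping
-- ===== SOURCE A (Python) =====
-- def separate_overlapping(strings):
--     # Sort strings by length in descending order
--     strings.sort(key=len, reverse=True)
--
--     list1 = []
--     list2 = []
--
--     for string in strings:
--         # Check if string is a substring of any string in list1
--         if any(string in s for s in list1):
--             list2.append(string)
--         else:
--             list1.append(string)
--
--     return list1, list2
-- ===== SOURCE B (Python) =====
-- def separate_overlapping(strings):
--     # Sort strings by length in descending order (in place, like the original)
--     strings.sort(key=len, reverse=True)
--     # A string is kept iff it is not a substring of any earlier (longer-or-equal) string;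
--     # by transitivity of the substring relation this matches checking only the kept ones.
--     list1 = [s for i, s in enumerate(strings) if not any(s in t for t in strings[:i])]
--     list2 = [s for i, s in enumerate(strings) if any(s in t for t in strings[:i])]
--     return list1, list2
-- ===== Notes on version B (the rewrite author's own statement) =====
-- stated objective: simpler
-- what changed: Instead of A's accumulator loop that tests each string against the kept list built so far, B classifies each string of the length-sorted list by testing it against all earlier (longer-or-equal) strings with two comprehensions; equal by transitivity of the substring relation.
import Mathlib
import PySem

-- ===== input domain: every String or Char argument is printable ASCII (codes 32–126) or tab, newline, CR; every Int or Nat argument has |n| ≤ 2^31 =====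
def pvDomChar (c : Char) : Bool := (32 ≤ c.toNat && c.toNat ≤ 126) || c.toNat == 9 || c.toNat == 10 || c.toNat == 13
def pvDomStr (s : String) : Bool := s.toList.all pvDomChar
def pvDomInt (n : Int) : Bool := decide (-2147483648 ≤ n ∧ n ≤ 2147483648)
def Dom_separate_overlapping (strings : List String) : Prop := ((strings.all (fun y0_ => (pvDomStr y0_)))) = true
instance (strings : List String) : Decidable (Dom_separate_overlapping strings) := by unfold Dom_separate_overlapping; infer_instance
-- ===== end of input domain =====

-- B replaces A's accumulator loop (membership tested against the kept list) by two
-- comprehensions that test each string against ALL earlier strings of the sorted list;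
-- equal by transitivity of the substring relation.  Objective: simpler.  Both versions
-- sort the argument list in place in Python; the equivalence is about the return value.

-- ===== PORT A =====
-- loop body of A's for-loop
def pvFoldA (acc : List String × List String) (string : String) : List String × List String :=
  if acc.1.any (fun s => PySem.Str.isIn string s) then (acc.1, acc.2 ++ [string])
  else (acc.1 ++ [string], acc.2)

def separate_overlapping (strings : List String) : List String × List String :=
  let ss := PySem.List.sorted strings (fun s => PySem.Str.len s) true
  ss.foldl pvFoldA ([], [])

-- ===== PORT B =====
def separate_overlapping_alt (strings : List String) : List String × List String :=
  let ss := PySem.List.sorted strings (fun s => PySem.Str.len s) true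
  ((PySem.List.enumerate ss).filterMap (fun is =>
      if !((PySem.List.slice ss none (some is.1)).any (fun t => PySem.Str.isIn is.2 t))
      then some is.2 else none),
   (PySem.List.enumerate ss).filterMap (fun is =>
      if (PySem.List.slice ss none (some is.1)).any (fun t => PySem.Str.isIn is.2 t)
      then some is.2 else none))

-- ===== PRECONDITION & SPEC =====
def Spec_separate_overlapping (strings : List String) (out : List String × List String) : Prop := out = separate_overlapping_alt strings
instance (strings : List String) (out : List String × List String) : Decidable (Spec_separate_overlapping strings out) := by unfold Spec_separate_overlapping; infer_instance

-- ===== CLAIM (what is proved, stated in full; the proofs are below) =====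
def Claim_equal_separate_overlapping : Prop := ∀ (strings : List String), Dom_separate_overlapping strings → Spec_separate_overlapping strings (separate_overlapping strings)

-- ===== LEMMAS AND PROOFS =====

-- the strings of `rest` that are / are not substrings of an earlier string, `pre` already seen
def pvKept : List String → List String → List String
  | _, [] => []
  | pre, s :: r => if pre.any (fun t => PySem.Str.isIn s t) then pvKept (pre ++ [s]) r
                   else s :: pvKept (pre ++ [s]) r

def pvDrop : List String → List String → List String
  | _, [] => []
  | pre, s :: r => if pre.any (fun t => PySem.Str.isIn s t) then s :: pvDrop (pre ++ [s]) r
                   else pvDrop (pre ++ [s]) r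

theorem pv_isIn_refl (a : String) : PySem.Str.isIn a a = true := by
  rw [PySem.Str.isIn_iff_infix]

theorem pv_isIn_trans {a b c : String} (h1 : PySem.Str.isIn a b = true)
    (h2 : PySem.Str.isIn b c = true) : PySem.Str.isIn a c = true := by
  rw [PySem.Str.isIn_iff_infix] at *
  exact h1.trans h2

theorem pv_cond_eq (l1 pre : List String) (s : String)
    (h1 : ∀ t ∈ pre, ∃ u ∈ l1, PySem.Str.isIn t u = true)
    (h2 : ∀ u ∈ l1, u ∈ pre) :
    l1.any (fun t => PySem.Str.isIn s t) = pre.any (fun t => PySem.Str.isIn s t) := by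
  rw [Bool.eq_iff_iff]
  simp only [List.any_eq_true]
  constructor <;> rintro ⟨t, ht, hin⟩
  · exact ⟨t, h2 t ht, hin⟩
  · obtain ⟨u, hu, htu⟩ := h1 t ht
    exact ⟨u, hu, pv_isIn_trans hin htu⟩

theorem pv_foldA_eq (rest : List String) : ∀ (pre l1 l2 : List String),
    (∀ t ∈ pre, ∃ u ∈ l1, PySem.Str.isIn t u = true) →
    (∀ u ∈ l1, u ∈ pre) →
    rest.foldl pvFoldA (l1, l2) = (l1 ++ pvKept pre rest, l2 ++ pvDrop pre rest) := by
  induction rest with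
  | nil => intro pre l1 l2 _ _; simp only [List.foldl_nil, pvKept, pvDrop, List.append_nil]
  | cons s r ih =>
    intro pre l1 l2 h1 h2
    simp only [List.foldl_cons, pvFoldA, pvKept, pvDrop, pv_cond_eq l1 pre s h1 h2]
    by_cases hc : pre.any (fun t => PySem.Str.isIn s t) = true
    · simp only [hc, if_pos]
      rw [ih (pre ++ [s]) l1 (l2 ++ [s])]
      · simp
      · intro t ht
        rcases List.mem_append.mp ht with h | h
        · exact h1 t h
        · obtain ⟨u, hu, hsu⟩ := List.any_eq_true.mp hc
          simp only [List.mem_singleton] at h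
          subst h
          obtain ⟨v, hv, huv⟩ := h1 u hu
          exact ⟨v, hv, pv_isIn_trans hsu huv⟩
      · intro u hu; exact List.mem_append_left _ (h2 u hu)
    · rw [Bool.not_eq_true] at hc
      simp only [hc, Bool.false_eq_true, if_false]
      rw [ih (pre ++ [s]) (l1 ++ [s]) l2]
      · simp
      · intro t ht
        rcases List.mem_append.mp ht with h | h
        · obtain ⟨u, hu, htu⟩ := h1 t h
          exact ⟨u, List.mem_append_left _ hu, htu⟩
        · simp only [List.mem_singleton] at h
          subst h
          exact ⟨t, by simp, pv_isIn_refl t⟩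
      · intro u hu
        rcases List.mem_append.mp hu with h | h
        · exact List.mem_append_left _ (h2 u h)
        · exact List.mem_append_right _ h

theorem pv_slice_pre (pre rest : List String) :
    PySem.List.slice (pre ++ rest) none (some ((pre.length : Int))) = pre := by
  rw [PySem.List.slice_to_natCast]
  simp

theorem pv_enumB_kept (rest : List String) : ∀ (pre : List String),
    (PySem.List.enumerate rest (pre.length : Int)).filterMap (fun is =>
      if !((PySem.List.slice (pre ++ rest) none (some is.1)).any (fun t => PySem.Str.isIn is.2 t))
      then some is.2 else none) = pvKept pre rest := by
  induction rest with
  | nil => intro pre; simp [PySem.List.enumerate_nil, pvKept]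
  | cons s r ih =>
    intro pre
    rw [PySem.List.enumerate_cons]
    simp only [List.filterMap_cons, pv_slice_pre pre (s :: r), pvKept]
    have hr : (pre.length : Int) + 1 = ((pre ++ [s]).length : Int) := by simp
    have hss : pre ++ s :: r = (pre ++ [s]) ++ r := by simp
    by_cases hc : pre.any (fun t => PySem.Str.isIn s t) = true
    · simp only [hc, if_pos]
      rw [hr, hss]
      simpa using ih (pre ++ [s])
    · simp only [Bool.not_eq_true] at hc
      simp only [hc]
      rw [hr, hss]
      simpa using ih (pre ++ [s])

theorem pv_enumB_drop (rest : List String) : ∀ (pre : List String),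
    (PySem.List.enumerate rest (pre.length : Int)).filterMap (fun is =>
      if (PySem.List.slice (pre ++ rest) none (some is.1)).any (fun t => PySem.Str.isIn is.2 t)
      then some is.2 else none) = pvDrop pre rest := by
  induction rest with
  | nil => intro pre; simp [PySem.List.enumerate_nil, pvDrop]
  | cons s r ih =>
    intro pre
    rw [PySem.List.enumerate_cons]
    simp only [List.filterMap_cons, pv_slice_pre pre (s :: r), pvDrop]
    have hr : (pre.length : Int) + 1 = ((pre ++ [s]).length : Int) := by simp
    have hss : pre ++ s :: r = (pre ++ [s]) ++ r := by simp
    by_cases hc : pre.any (fun t => PySem.Str.isIn s t) = true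
    · simp only [hc, if_pos]
      rw [hr, hss]
      simpa using ih (pre ++ [s])
    · simp only [Bool.not_eq_true] at hc
      simp only [hc]
      rw [hr, hss]
      simpa using ih (pre ++ [s])

-- ===== VERDICT (by name: the statement is the Claim_ definition above) =====
theorem pv_main (ss : List String) :
    ss.foldl pvFoldA ([], []) =
      ((PySem.List.enumerate ss).filterMap (fun is =>
          if !((PySem.List.slice ss none (some is.1)).any (fun t => PySem.Str.isIn is.2 t))
          then some is.2 else none),
       (PySem.List.enumerate ss).filterMap (fun is =>
          if (PySem.List.slice ss none (some is.1)).any (fun t => PySem.Str.isIn is.2 t)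
          then some is.2 else none)) := by
  have hA := pv_foldA_eq ss [] [] [] (by simp) (by simp)
  have hB1 := pv_enumB_kept ss []
  have hB2 := pv_enumB_drop ss []
  simp only [List.nil_append, List.length_nil, Int.natCast_zero] at hA hB1 hB2
  rw [hA]; exact congrArg₂ Prod.mk hB1.symm hB2.symm


theorem separate_overlapping_spec : Claim_equal_separate_overlapping :=
  fun strings _ => pv_main (PySem.List.sorted strings (fun s => PySem.Str.len s) true)
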